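-- pv_equiv track=rewrite | github.com/junhokim42/Python_study | Coding_test/02_programmers_Lv2/17.py | solution
-- ===== SOURCE A (Python) =====
-- from collections import Counter
--
-- def solution(k, tangerine):
--     answer = 0
--     cnt = sorted(Counter(tangerine).items(), reverse=True, key=lambda x:x[1])
--     for key, v in cnt:
--         if k <=0:break
--         k -=v
--         answer += 1
--     return answer
-- ===== SOURCE B (Python) =====
-- from collections import Counter
--
-- def solution(k, tangerine):
--     cnt = Counter(tangerine)
--     buckets = Counter(cnt.values())
--     answer = 0
--     f = len(tangerine)
--     while f >= 1:
--         if k <= 0: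
--             break
--         c = buckets.get(f, 0)
--         while c > 0 and k > 0:
--             k -= f
--             answer += 1
--             c -= 1
--         f -= 1
--     return answer
-- ===== Notes on version B (the rewrite author's own statement) =====
-- stated objective: alternative
-- what changed: Replaces the O(n log n) sort of counter items by a frequency-of-frequencies table (Counter of counts) scanned from the highest possible frequency downward, taking groups greedily without sorting.
import Mathlib
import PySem

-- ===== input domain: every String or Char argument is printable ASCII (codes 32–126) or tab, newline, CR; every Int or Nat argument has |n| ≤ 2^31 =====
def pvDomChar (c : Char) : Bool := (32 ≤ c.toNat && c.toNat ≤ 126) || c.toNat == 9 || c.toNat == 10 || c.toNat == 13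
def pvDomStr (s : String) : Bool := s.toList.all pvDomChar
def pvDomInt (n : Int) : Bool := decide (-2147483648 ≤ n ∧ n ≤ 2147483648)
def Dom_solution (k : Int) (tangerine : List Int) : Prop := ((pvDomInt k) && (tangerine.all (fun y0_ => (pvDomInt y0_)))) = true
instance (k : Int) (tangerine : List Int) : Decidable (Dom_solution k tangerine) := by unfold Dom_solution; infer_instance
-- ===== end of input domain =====

-- B replaces A's sort of the counter items by a frequency-of-frequencies table scanned
-- from the highest possible frequency downward (objective: alternative algorithm, no sort).

-- ===== PORT A =====
-- A's for-loop over the sorted (key, v) pairs with a break on k <= 0.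
def solutionLoopA : Int → Int → List (Int × Int) → Int
  | answer, _, [] => answer
  | answer, k, (_, v) :: rest =>
      if k ≤ 0 then answer else solutionLoopA (answer + 1) (k - v) rest

def solution (k : Int) (tangerine : List Int) : Int :=
  solutionLoopA 0 k
    (PySem.List.sorted (PySem.Dict.counter tangerine).items (fun x => x.2) true)

-- ===== PORT B =====
-- B's inner 'while c > 0 and k > 0' loop; c is a count, hence nonnegative, so Nat fuel is exact.
def solutionInnerB (f : Int) : Nat → Int → Int → Int × Int
  | 0, k, answer => (k, answer)
  | c + 1, k, answer =>
      if k ≤ 0 then (k, answer) else solutionInnerB f c (k - f) (answer + 1)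

-- B's outer 'while f >= 1' loop, f counting down from len(tangerine).
def solutionOuterB (buckets : PySem.Dict Int Int) : Nat → Int → Int → Int
  | 0, _, answer => answer
  | f + 1, k, answer =>
      if k ≤ 0 then answer
      else
        let p := solutionInnerB ((f : Int) + 1)
                   ((buckets.getD ((f : Int) + 1) 0).toNat) k answer
        solutionOuterB buckets f p.1 p.2

def solution_alt (k : Int) (tangerine : List Int) : Int :=
  solutionOuterB (PySem.Dict.counter (PySem.Dict.counter tangerine).values)
    tangerine.length k 0

-- ===== PRECONDITION & SPEC =====
def Spec_solution (k : Int) (tangerine : List Int) (out : Int) : Prop := out = solution_alt k tangerine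
instance (k : Int) (tangerine : List Int) (out : Int) : Decidable (Spec_solution k tangerine out) := by unfold Spec_solution; infer_instance

-- ===== CLAIM (what is proved, stated in full; the proofs are below) =====
def Claim_equal_solution : Prop := ∀ (k : Int) (tangerine : List Int), Dom_solution k tangerine → Spec_solution k tangerine (solution k tangerine)

-- ===== LEMMAS AND PROOFS =====

-- The common greedy loop over a list of group sizes.
def pvGreedy : Int → Int → List Int → Int
  | a, _, [] => a
  | a, k, v :: rest => if k ≤ 0 then a else pvGreedy (a + 1) (k - v) rest

theorem pvGreedy_nonpos (a k : Int) (l : List Int) (h : k ≤ 0) : pvGreedy a k l = a := by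
  cases l <;> simp [pvGreedy, h]

theorem loopA_eq_greedy (l : List (Int × Int)) : ∀ a k,
    solutionLoopA a k l = pvGreedy a k (l.map (·.2)) := by
  induction l with
  | nil => intro a k; rfl
  | cons p rest ih =>
      intro a k
      cases p with
      | mk key v =>
        by_cases h : k ≤ 0
        · simp [solutionLoopA, pvGreedy, h]
        · simp [solutionLoopA, pvGreedy, h, ih]

theorem innerB_eq_greedy (v : Int) (c : Nat) : ∀ a k (rest : List Int),
    pvGreedy a k (List.replicate c v ++ rest)
      = pvGreedy (solutionInnerB v c k a).2 (solutionInnerB v c k a).1 rest := by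
  induction c with
  | zero => intro a k rest; rfl
  | succ c ih =>
      intro a k rest
      by_cases h : k ≤ 0
      · simp [solutionInnerB, h, pvGreedy_nonpos _ _ _ h,
          List.replicate_succ]
      · simp [solutionInnerB, pvGreedy, h, List.replicate_succ, ih]

-- The descending list of group sizes B's outer loop works through.
def pvBlocks (bk : PySem.Dict Int Int) : Nat → List Int
  | 0 => []
  | f + 1 =>
      List.replicate ((bk.getD ((f : Int) + 1) 0).toNat) ((f : Int) + 1) ++ pvBlocks bk f

theorem outerB_eq_greedy (bk : PySem.Dict Int Int) (f : Nat) : ∀ a k,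
    solutionOuterB bk f k a = pvGreedy a k (pvBlocks bk f) := by
  induction f with
  | zero => intro a k; rfl
  | succ f ih =>
      intro a k
      by_cases h : k ≤ 0
      · simp [solutionOuterB, h, pvBlocks, pvGreedy_nonpos _ _ _ h]
      · simp [solutionOuterB, h, pvBlocks, innerB_eq_greedy, ih]

theorem mem_pvBlocks_le (bk : PySem.Dict Int Int) (f : Nat) :
    ∀ x ∈ pvBlocks bk f, x ≤ (f : Int) := by
  induction f with
  | zero => intro x hx; cases hx
  | succ f ih =>
      intro x hx
      rcases List.mem_append.1 hx with h | h
      · rw [List.eq_of_mem_replicate h]; push_cast; omega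
      · have := ih x h; push_cast; omega

theorem pvBlocks_pairwise (bk : PySem.Dict Int Int) (f : Nat) :
    (pvBlocks bk f).Pairwise (fun a b => b ≤ a) := by
  induction f with
  | zero => exact List.Pairwise.nil
  | succ f ih =>
      refine List.pairwise_append.2 ⟨?_, ih, ?_⟩
      · simp [List.pairwise_replicate]
      · intro a ha b hb
        rw [List.eq_of_mem_replicate ha]
        have := mem_pvBlocks_le bk f b hb
        omega

theorem count_pvBlocks (values : List Int) (f : Nat) (v : Int) :
    (pvBlocks (PySem.Dict.counter values) f).count v
      = if 1 ≤ v ∧ v ≤ (f : Int) then values.count v else 0 := by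
  induction f with
  | zero =>
      rw [if_neg (by push_cast; omega)]
      simp [pvBlocks]
  | succ f ih =>
      simp only [pvBlocks, List.count_append, List.count_replicate, beq_iff_eq, ih,
        PySem.Dict.getD_counter, Int.toNat_natCast]
      by_cases hv : (f : Int) + 1 = v
      · rw [if_pos hv, if_neg (by omega), if_pos (by push_cast; omega), hv]
        omega
      · rw [if_neg hv]
        by_cases h1 : 1 ≤ v ∧ v ≤ (f : Int)
        · rw [if_pos h1, if_pos (by push_cast; omega)]
          omega
        · rw [if_neg h1, if_neg (by push_cast; omega)]

theorem mem_values_counter (tangerine : List Int) (x : Int)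
    (hx : x ∈ (PySem.Dict.counter tangerine).values) :
    1 ≤ x ∧ x ≤ (tangerine.length : Int) := by
  have hv : (PySem.Dict.counter tangerine).values
      = (PySem.Set.ofList tangerine).map (fun key => (tangerine.count key : Int)) := by
    simp [PySem.Dict.values, PySem.Dict.items_counter]
  rw [hv] at hx
  rcases List.mem_map.1 hx with ⟨key, hk, rfl⟩
  have hmem : key ∈ tangerine := (PySem.Set.mem_ofList tangerine key).1 hk
  have h1 : 1 ≤ tangerine.count key := List.one_le_count_iff.2 hmem
  have h2 : tangerine.count key ≤ tangerine.length := List.count_le_length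
  exact ⟨by exact_mod_cast h1, by exact_mod_cast h2⟩

theorem pvBlocks_perm_values (tangerine : List Int) :
    (pvBlocks (PySem.Dict.counter (PySem.Dict.counter tangerine).values)
        tangerine.length).Perm (PySem.Dict.counter tangerine).values := by
  rw [List.perm_iff_count]
  intro v
  rw [count_pvBlocks]
  split
  · rfl
  · rename_i h
    symm
    rw [List.count_eq_zero]
    intro hm
    exact h (mem_values_counter tangerine v hm)

theorem sortedA_map_eq_blocks (tangerine : List Int) :
    ((PySem.List.sorted (PySem.Dict.counter tangerine).items (fun x => x.2) true).map (·.2))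
      = pvBlocks (PySem.Dict.counter (PySem.Dict.counter tangerine).values)
          tangerine.length := by
  refine List.Perm.eq_of_pairwise (le := fun a b : Int => b ≤ a)
    (fun a b _ _ h h' => le_antisymm h' h) ?_ ?_ ?_
  · exact List.Pairwise.map (f := fun x : Int × Int => x.2)
      (S := fun a b : Int => b ≤ a) (fun a b h => h)
      (PySem.List.sorted_pairwise_rev (PySem.Dict.counter tangerine).items (fun x => x.2))
  · exact pvBlocks_pairwise _ _
  · have h1 : ((PySem.List.sorted (PySem.Dict.counter tangerine).items (fun x => x.2) true).map (·.2)).Perm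
        ((PySem.Dict.counter tangerine).items.map (·.2)) :=
      (PySem.List.sorted_perm _ _ _).map _
    have h2 : ((PySem.Dict.counter tangerine).items.map (·.2))
        = (PySem.Dict.counter tangerine).values := by
      simp [PySem.Dict.values]
    exact (h1.trans (h2 ▸ List.Perm.refl _)).trans (pvBlocks_perm_values tangerine).symm

-- ===== VERDICT (by name: the statement is the Claim_ definition above) =====
theorem solution_spec : Claim_equal_solution := by
  intro k tangerine _
  unfold Spec_solution solution solution_alt
  rw [loopA_eq_greedy, outerB_eq_greedy, sortedA_map_eq_blocks]
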